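-- pv_equiv track=rewrite | github.com/jjsam07/jjsam07.github.io | attlh/player.py | frame_deserialize
-- ===== SOURCE A (Python) =====
-- def frame_deserialize(byte_array):
-- 	result = []
-- 	index = 4
-- 	metadata = 0
-- 	for b in byte_array:
-- 		if index == 4:
-- 			metadata = b
-- 			index = 0
-- 			continue
-- 		if metadata & (1 << (index * 2)):
-- 			result.append((b >> 4) | 0b10000)
-- 		else:
-- 			result.append(b >> 4)
-- 		if metadata & (1 << ((index * 2) + 1)):
-- 			result.append((b & 0b1111) | 0b10000)
-- 		else:
-- 			result.append(b & 0b1111)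
-- 		index += 1
-- 	return result
-- ===== SOURCE B (Python) =====
-- def frame_deserialize(byte_array):
-- 	# Chunked decomposition: walk the input in 5-byte frames
-- 	# (1 metadata byte + up to 4 data bytes), two nibbles per data byte.
-- 	result = []
-- 	i = 0
-- 	n = len(byte_array)
-- 	while i < n:
-- 		metadata = byte_array[i]
-- 		chunk = byte_array[i + 1:i + 5]
-- 		i += 5
-- 		for j, b in enumerate(chunk):
-- 			hi = b >> 4
-- 			lo = b & 0b1111
-- 			if metadata & (1 << (2 * j)):
-- 				hi |= 0b10000
-- 			if metadata & (1 << (2 * j + 1)):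
-- 				lo |= 0b10000
-- 			result.append(hi)
-- 			result.append(lo)
-- 	return result
-- ===== Notes on version B (the rewrite author's own statement) =====
-- stated objective: alternative
-- what changed: Replaced A's flat single loop with a mutating index/metadata state machine and 'continue' by an index pointer stepping in 5-byte frames (one metadata byte then up to 4 data bytes) with a nested per-chunk nibble pass; same O(n) cost.
import Mathlib
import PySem

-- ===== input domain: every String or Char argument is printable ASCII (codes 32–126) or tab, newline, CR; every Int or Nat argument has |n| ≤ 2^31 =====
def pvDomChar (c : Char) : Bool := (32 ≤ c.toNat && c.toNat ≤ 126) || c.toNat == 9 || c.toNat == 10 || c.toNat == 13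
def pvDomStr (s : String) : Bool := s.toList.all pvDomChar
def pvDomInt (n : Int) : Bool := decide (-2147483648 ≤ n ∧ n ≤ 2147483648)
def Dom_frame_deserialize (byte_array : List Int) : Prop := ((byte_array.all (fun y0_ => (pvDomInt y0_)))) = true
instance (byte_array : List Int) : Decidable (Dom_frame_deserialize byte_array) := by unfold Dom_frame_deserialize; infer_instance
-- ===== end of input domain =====

-- B replaces A's flat state-machine loop (metadata flag + resetting index counter + continue)
-- with explicit 5-byte chunking and a nested per-chunk pass; objective: alternative decomposition, same value and cost.

-- ===== PORT A =====
-- one loop step of A: state = (result, index, metadata)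
def pvStepA (s : List Int × Int × Int) (b : Int) : List Int × Int × Int :=
  let result := s.1
  let index := s.2.1
  let metadata := s.2.2
  if index == 4 then (result, 0, b)
  else
    let result :=
      if PySem.Int.band metadata (1 <<< (index * 2).toNat) ≠ 0 then
        result ++ [PySem.Int.bor (b >>> 4) 16]
      else
        result ++ [b >>> 4]
    let result :=
      if PySem.Int.band metadata (1 <<< ((index * 2) + 1).toNat) ≠ 0 then
        result ++ [PySem.Int.bor (PySem.Int.band b 15) 16]
      else
        result ++ [PySem.Int.band b 15]
    (result, index + 1, metadata)

def frame_deserialize (byte_array : List Int) : List Int :=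
  (byte_array.foldl pvStepA ([], 4, 0)).1

-- ===== PORT B =====
-- inner loop of B: 'for j, b in enumerate(chunk)', two nibbles per byte
def pvInner (metadata : Int) : Int → List Int → List Int
  | _, [] => []
  | j, b :: bs =>
    let hi := b >>> 4
    let lo := PySem.Int.band b 15
    let hi := if PySem.Int.band metadata (1 <<< (2 * j).toNat) ≠ 0 then PySem.Int.bor hi 16 else hi
    let lo := if PySem.Int.band metadata (1 <<< (2 * j + 1).toNat) ≠ 0 then PySem.Int.bor lo 16 else lo
    hi :: lo :: pvInner metadata (j + 1) bs

-- outer while loop of B: index pointer i stepping by 5; xs[i] via pyGetD (in range when i < len),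
-- chunk = byte_array[i+1:i+5] via PySem slice
def pvChunksGo (xs : List Int) (i : Nat) : List Int :=
  if i < xs.length then
    let metadata := PySem.List.pyGetD xs (i : Int) 0
    let chunk := PySem.List.slice xs (some ((i : Int) + 1)) (some ((i : Int) + 5))
    pvInner metadata 0 chunk ++ pvChunksGo xs (i + 5)
  else []
termination_by xs.length - i

def frame_deserialize_alt (byte_array : List Int) : List Int :=
  pvChunksGo byte_array 0

-- ===== PRECONDITION & SPEC =====
def Spec_frame_deserialize (byte_array : List Int) (out : List Int) : Prop := out = frame_deserialize_alt byte_array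
instance (byte_array : List Int) (out : List Int) : Decidable (Spec_frame_deserialize byte_array out) := by unfold Spec_frame_deserialize; infer_instance

-- ===== CLAIM (what is proved, stated in full; the proofs are below) =====
def Claim_equal_frame_deserialize : Prop := ∀ (byte_array : List Int), Dom_frame_deserialize byte_array → Spec_frame_deserialize byte_array (frame_deserialize byte_array)

-- ===== LEMMAS AND PROOFS =====

-- proof-side helper: the chunk recursion expressed directly on the list suffix
def pvChunks (rest : List Int) : List Int :=
  match rest with
  | [] => []
  | metadata :: rs => pvInner metadata 0 (rs.take 4) ++ pvChunks (rs.drop 4)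
termination_by rest.length
decreasing_by simp [List.length_drop]


-- loop invariant relating A's state machine to B's chunk recursion
lemma pvShift0 : ((1:Int) <<< (0:Nat)) = 1 := by decide
lemma pvShift1 : ((1:Int) <<< (1:Nat)) = 2 := by decide
lemma pvShift2 : ((1:Int) <<< (2:Nat)) = 4 := by decide
lemma pvShift3 : ((1:Int) <<< (3:Nat)) = 8 := by decide
lemma pvShift4 : ((1:Int) <<< (4:Nat)) = 16 := by decide
lemma pvShift5 : ((1:Int) <<< (5:Nat)) = 32 := by decide
lemma pvShift6 : ((1:Int) <<< (6:Nat)) = 64 := by decide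
lemma pvShift7 : ((1:Int) <<< (7:Nat)) = 128 := by decide

lemma pvChunks_nil : pvChunks [] = [] := by unfold pvChunks; rfl

lemma pvChunks_cons (m : Int) (rs : List Int) :
    pvChunks (m :: rs) = pvInner m 0 (rs.take 4) ++ pvChunks (rs.drop 4) := by conv_lhs => unfold pvChunks

lemma pvStepA_key : ∀ (l res : List Int) (m j : Int), 0 ≤ j → j ≤ 4 →
    (List.foldl pvStepA (res, j, m) l).1 =
      if j = 4 then res ++ pvChunks l
      else res ++ pvInner m j (l.take (4 - j).toNat) ++ pvChunks (l.drop (4 - j).toNat) := by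
  intro l
  induction l with
  | nil =>
    intro res m j h0 h4
    split_ifs <;> simp [pvChunks_nil, pvInner]
  | cons b l' ih =>
    intro res m j h0 h4
    interval_cases j
    · -- j = 0
      simp only [List.foldl_cons, pvStepA]
      norm_num
      rw [ih _ _ 1 (by norm_num) (by norm_num)]
      try norm_num
      try simp only [pvInner]
      try norm_num
      try simp only [pvShift0, pvShift1, pvShift2, pvShift3, pvShift4, pvShift5, pvShift6, pvShift7]
      split_ifs <;> simp_all [pvInner, pvShift0, pvShift1, pvShift2, pvShift3, pvShift4, pvShift5, pvShift6, pvShift7, Int.toNat]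
    · -- j = 1
      simp only [List.foldl_cons, pvStepA]
      norm_num
      rw [ih _ _ 2 (by norm_num) (by norm_num)]
      try norm_num
      try simp only [pvInner]
      try norm_num
      try simp only [pvShift0, pvShift1, pvShift2, pvShift3, pvShift4, pvShift5, pvShift6, pvShift7]
      split_ifs <;> simp_all [pvInner, pvShift0, pvShift1, pvShift2, pvShift3, pvShift4, pvShift5, pvShift6, pvShift7, Int.toNat]
    · -- j = 2
      simp only [List.foldl_cons, pvStepA]
      norm_num
      rw [ih _ _ 3 (by norm_num) (by norm_num)]
      try norm_num
      try simp only [pvInner]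
      try norm_num
      try simp only [pvShift0, pvShift1, pvShift2, pvShift3, pvShift4, pvShift5, pvShift6, pvShift7]
      split_ifs <;> simp_all [pvInner, pvShift0, pvShift1, pvShift2, pvShift3, pvShift4, pvShift5, pvShift6, pvShift7, Int.toNat]
    · -- j = 3
      simp only [List.foldl_cons, pvStepA]
      norm_num
      rw [ih _ _ 4 (by norm_num) (by norm_num)]
      try norm_num
      try simp only [pvInner]
      try norm_num
      try simp only [pvShift0, pvShift1, pvShift2, pvShift3, pvShift4, pvShift5, pvShift6, pvShift7]
      split_ifs <;> simp_all [pvInner, pvShift0, pvShift1, pvShift2, pvShift3, pvShift4, pvShift5, pvShift6, pvShift7, Int.toNat]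
    · -- j = 4 : this byte becomes the metadata of a new chunk
      simp only [List.foldl_cons, pvStepA]
      norm_num
      rw [ih _ _ 0 (by norm_num) (by norm_num), pvChunks_cons]
      norm_num
      rfl

-- B's index loop equals the list-suffix chunk recursion
lemma pvChunksGo_eq (xs : List Int) : ∀ i : Nat, pvChunksGo xs i = pvChunks (xs.drop i) := by
  intro i
  fun_induction pvChunksGo xs i with
  | case1 i h metadata chunk ih =>
    have hd : xs.drop i = xs[i] :: xs.drop (i + 1) := List.drop_eq_getElem_cons h
    rw [hd, pvChunks_cons, ih]
    simp only [metadata, chunk]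
    have h1 : ((i : Int) + 1) = ((i + 1 : Nat) : Int) := by push_cast; ring
    have h5 : ((i : Int) + 5) = ((i + 1 : Nat) : Int) + (4 : Nat) := by push_cast; ring
    rw [h1, h5, PySem.List.slice_natCast_add, PySem.List.pyGetD_ofNat _ _ _ h]
    simp [List.drop_drop]
  | case2 i h =>
    rw [List.drop_eq_nil_of_le (by omega), pvChunks_nil]

-- ===== VERDICT (by name: the statement is the Claim_ definition above) =====
theorem frame_deserialize_spec : Claim_equal_frame_deserialize := by
  intro xs _
  unfold Spec_frame_deserialize frame_deserialize frame_deserialize_alt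
  rw [pvStepA_key xs [] 0 4 (by omega) (by omega), pvChunksGo_eq]
  simp
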